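-- pv_equiv track=rewrite | github.com/leah-1ee/coding-test-study | 프로그래머스/1/76501. 음양 더하기/음양 더하기.py | solution
-- ===== SOURCE A (Python) =====
-- def solution(absolutes, signs):
--     answer = 0
--
--     for n, s in zip(absolutes, signs):
--         if s == True:
--             answer += n
--         else:
--             answer -= n
--
--     return answer
-- ===== SOURCE B (Python) =====
-- def solution(absolutes, signs):
--     pairs = list(zip(absolutes, signs))
--     total = sum(n for n, s in pairs)
--     negatives = sum(n for n, s in pairs if not (s == True))
--     return total - 2 * negatives
-- ===== Notes on version B (the rewrite author's own statement) =====
-- stated objective: alternative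
-- what changed: Replaced the single branching accumulator loop with two unconditional summations (all magnitudes, and the negatively-signed magnitudes) combined by the identity total - 2*negatives.
import Mathlib
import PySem

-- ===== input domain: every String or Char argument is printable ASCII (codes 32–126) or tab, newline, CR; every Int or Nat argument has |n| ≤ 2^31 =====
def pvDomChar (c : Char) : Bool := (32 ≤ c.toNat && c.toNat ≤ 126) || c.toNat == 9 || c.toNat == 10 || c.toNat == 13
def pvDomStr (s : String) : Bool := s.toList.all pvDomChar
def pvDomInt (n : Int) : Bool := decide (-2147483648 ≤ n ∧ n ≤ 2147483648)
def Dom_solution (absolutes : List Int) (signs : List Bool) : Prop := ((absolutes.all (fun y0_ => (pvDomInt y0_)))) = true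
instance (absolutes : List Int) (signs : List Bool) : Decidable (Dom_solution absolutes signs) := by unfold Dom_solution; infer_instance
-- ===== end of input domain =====

-- B replaces A's single branching accumulator with two unconditional summations combined arithmetically (objective: alternative).


-- ===== PORT A =====
def solution (absolutes : List Int) (signs : List Bool) : Int :=
  (absolutes.zip signs).foldl
    (fun answer p => if p.2 == true then answer + p.1 else answer - p.1) 0

-- ===== PORT B =====
def solution_alt (absolutes : List Int) (signs : List Bool) : Int :=
  let pairs := absolutes.zip signs
  let total := (pairs.map Prod.fst).sum
  let negatives := ((pairs.filter (fun p => !(p.2 == true))).map Prod.fst).sum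
  total - 2 * negatives

-- ===== PRECONDITION & SPEC =====
def Spec_solution (absolutes : List Int) (signs : List Bool) (out : Int) : Prop := out = solution_alt absolutes signs
instance (absolutes : List Int) (signs : List Bool) (out : Int) : Decidable (Spec_solution absolutes signs out) := by unfold Spec_solution; infer_instance

-- ===== CLAIM (what is proved, stated in full; the proofs are below) =====
def Claim_equal_solution : Prop := ∀ (absolutes : List Int) (signs : List Bool), Dom_solution absolutes signs → Spec_solution absolutes signs (solution absolutes signs)

-- ===== LEMMAS AND PROOFS =====

theorem solution_foldl_eq (l : List (Int × Bool)) (acc : Int) :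
    l.foldl (fun answer p => if p.2 == true then answer + p.1 else answer - p.1) acc
      = acc + (l.map Prod.fst).sum - 2 * ((l.filter (fun p => !(p.2 == true))).map Prod.fst).sum := by
  induction l generalizing acc with
  | nil => simp
  | cons h t ih =>
    obtain ⟨n, s⟩ := h
    cases s <;> simp only [List.foldl_cons, List.filter_cons] <;>
      rw [ih] <;> simp <;> ring

-- ===== VERDICT (by name: the statement is the Claim_ definition above) =====
theorem solution_spec : Claim_equal_solution := by
  intro absolutes signs _
  show _ = _
  simp only [solution, solution_alt, solution_foldl_eq]
  ring
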